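-- pv_equiv track=rewrite | github.com/dharmagnavyas/rag-conversational-agent | chat_agent.py | format_answer_for_display
-- ===== SOURCE A (Python) =====
-- def format_answer_for_display(answer: str) -> str:
--     """
--     Format the answer for terminal display.
--     """
--     # Add some visual separation
--     lines = answer.split('\n')
--     formatted = []
--
--     for line in lines:
--         if line.startswith('**Answer:**'):
--             formatted.append('\n' + line)
--         elif line.startswith('**Evidence:**'):
--             formatted.append('\n' + line)
--         else:
--             formatted.append(line)
--
--     return '\n'.join(formatted)
-- ===== SOURCE B (Python) =====
-- def format_answer_for_display(answer: str) -> str: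
--     # Single left-to-right pass over characters: at each line start, check for a
--     # marker and emit a blank line before it; no split/join, no list of lines.
--     out = []
--     start = True
--     for i, c in enumerate(answer):
--         if start and (answer.startswith('**Answer:**', i) or answer.startswith('**Evidence:**', i)):
--             out.append('\n')
--         out.append(c)
--         start = (c == '\n')
--     return ''.join(out)
-- ===== Notes on version B (the rewrite author's own statement) =====
-- stated objective: alternative
-- what changed: Replaces the split-into-lines / per-line-branch / join pipeline with a single left-to-right pass over the characters that checks for the markers at each line start and inserts the blank line in place, maintaining no list of lines.
import Mathlib
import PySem

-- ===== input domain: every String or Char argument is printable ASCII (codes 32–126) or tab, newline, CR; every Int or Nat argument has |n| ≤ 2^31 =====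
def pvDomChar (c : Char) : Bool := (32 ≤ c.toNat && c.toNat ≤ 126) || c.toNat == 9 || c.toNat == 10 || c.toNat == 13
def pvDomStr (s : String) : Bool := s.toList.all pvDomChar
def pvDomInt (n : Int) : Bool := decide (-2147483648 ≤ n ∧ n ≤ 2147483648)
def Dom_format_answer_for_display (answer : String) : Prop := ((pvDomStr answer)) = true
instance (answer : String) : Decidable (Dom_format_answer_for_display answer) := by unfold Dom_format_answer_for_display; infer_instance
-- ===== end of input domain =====

-- B replaces A's split-into-lines / per-line branches / join pipeline by a single
-- left-to-right pass over the characters (objective: alternative, same cost).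

-- ===== PORT A =====
-- lines = answer.split('\n'); for line in lines: …append…; return '\n'.join(formatted)
def format_answer_for_display (answer : String) : String :=
  let lines := PySem.Chars.splitOn answer.toList ['\n']
  let formatted := lines.foldl (fun acc line =>
    if PySem.Chars.startswith line "**Answer:**".toList then acc ++ ['\n' :: line]
    else if PySem.Chars.startswith line "**Evidence:**".toList then acc ++ ['\n' :: line]
    else acc ++ [line]) []
  String.ofList (PySem.Chars.join ['\n'] formatted)

-- ===== PORT B =====
-- the for-loop of Source B: `start` tracks whether we are at a line start; the
-- startswith(marker, i) test on the remainder is exactly startswith of the suffix.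
def pvAltGo : List Char → Bool → List Char
  | [], _ => []
  | c :: rest, start =>
    if start && (PySem.Chars.startswith (c :: rest) "**Answer:**".toList
                 || PySem.Chars.startswith (c :: rest) "**Evidence:**".toList) then
      '\n' :: c :: pvAltGo rest (c == '\n')
    else
      c :: pvAltGo rest (c == '\n')

def format_answer_for_display_alt (answer : String) : String :=
  String.ofList (pvAltGo answer.toList true)

-- ===== PRECONDITION & SPEC =====
def Spec_format_answer_for_display (answer : String) (out : String) : Prop := out = format_answer_for_display_alt answer
instance (answer : String) (out : String) : Decidable (Spec_format_answer_for_display answer out) := by unfold Spec_format_answer_for_display; infer_instance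

-- ===== CLAIM (what is proved, stated in full; the proofs are below) =====
def Claim_equal_format_answer_for_display : Prop := ∀ (answer : String), Dom_format_answer_for_display answer → Spec_format_answer_for_display answer (format_answer_for_display answer)

-- ===== LEMMAS AND PROOFS =====

-- a clean structural model of answer.split('\n')
def pvSplit : List Char → List (List Char)
  | [] => [[]]
  | c :: cs =>
    if c = '\n' then [] :: pvSplit cs
    else
      match pvSplit cs with
      | [] => [[c]]
      | h :: t => (c :: h) :: t

-- the per-line transformation of A's loop body
def pvG (line : List Char) : List Char :=
  if PySem.Chars.startswith line "**Answer:**".toList then '\n' :: line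
  else if PySem.Chars.startswith line "**Evidence:**".toList then '\n' :: line
  else line

theorem pvSplit_ne_nil (cs : List Char) : pvSplit cs ≠ [] := by
  cases cs with
  | nil => simp [pvSplit]
  | cons c cs =>
    simp only [pvSplit]
    split_ifs with h
    · simp
    · rcases e : pvSplit cs with _ | ⟨h0, t0⟩ <;> simp

theorem pvGo_eq (fuel : Nat) (cs cur : List Char) (acc : List (List Char))
    (hf : cs.length ≤ fuel) :
    PySem.Chars.splitOn.go ['\n'] fuel cs cur acc
      = acc.reverse ++ (pvSplit cs).modifyHead (cur.reverse ++ ·) := by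
  induction fuel generalizing cs cur acc with
  | zero =>
    have : cs = [] := by cases cs <;> simp_all
    subst this
    rw [PySem.Chars.splitOn.go.eq_def]
    simp [pvSplit]
  | succ f ih =>
    cases cs with
    | nil =>
      rw [PySem.Chars.splitOn.go.eq_def]
      simp [pvSplit]
    | cons c rest =>
      rw [PySem.Chars.splitOn.go.eq_def]
      simp only []
      by_cases hc : c = '\n'
      · subst hc
        have hp : List.isPrefixOf ['\n'] ('\n' :: rest) = true := by
          simp [List.isPrefixOf]
        simp only [hp, if_true]
        have hd : List.drop ['\n'].length ('\n' :: rest) = rest := rfl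
        rw [hd, ih rest [] (cur.reverse :: acc) (by simp at hf; omega)]
        simp [pvSplit]
        cases pvSplit rest <;> simp
      · have hp : List.isPrefixOf ['\n'] (c :: rest) = false := by
          simp [List.isPrefixOf]
          intro h; exact absurd h.symm hc
        simp only [hp, Bool.false_eq_true, if_false]
        rw [ih rest (c :: cur) acc (by simp at hf; omega)]
        rcases e : pvSplit rest with _ | ⟨h0, t0⟩
        · exact absurd e (pvSplit_ne_nil rest)
        · simp [pvSplit, hc, e]

theorem pvSplitOn_eq (cs : List Char) :
    PySem.Chars.splitOn cs ['\n'] = pvSplit cs := by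
  show PySem.Chars.splitOn.go ['\n'] (cs.length + 1) cs [] [] = pvSplit cs
  rw [pvGo_eq (cs.length + 1) cs [] [] (by omega)]
  rcases e : pvSplit cs with _ | ⟨h0, t0⟩
  · exact absurd e (pvSplit_ne_nil cs)
  · simp

theorem pvJoin_pvSplit (cs : List Char) :
    PySem.Chars.join ['\n'] (pvSplit cs) = cs := by
  induction cs with
  | nil => simp [pvSplit, PySem.Chars.join_singleton]
  | cons c rest ih =>
    simp only [pvSplit]
    split_ifs with hc
    · subst hc
      rcases e : pvSplit rest with _ | ⟨h0, t0⟩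
      · exact absurd e (pvSplit_ne_nil rest)
      · rw [e] at ih
        rw [PySem.Chars.join_cons_cons]
        simp [ih]
    · rcases e : pvSplit rest with _ | ⟨h0, t0⟩
      · exact absurd e (pvSplit_ne_nil rest)
      · rw [e] at ih
        cases t0 with
        | nil =>
          rw [PySem.Chars.join_singleton] at ih ⊢
          simp [ih]
        | cons q t1 =>
          rw [PySem.Chars.join_cons_cons] at ih ⊢
          simp at ih ⊢
          simp [ih]

-- '\n'.join with a nonempty first chunk peels its head character
theorem pvJoin_cons_head (c : Char) (x : List Char) (L : List (List Char)) :
    PySem.Chars.join ['\n'] ((c :: x) :: L) = c :: PySem.Chars.join ['\n'] (x :: L) := by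
  cases L with
  | nil => rw [PySem.Chars.join_singleton, PySem.Chars.join_singleton]
  | cons q t => rw [PySem.Chars.join_cons_cons, PySem.Chars.join_cons_cons]; simp

theorem pvJoin_nil_cons (x : List Char) (L : List (List Char)) :
    PySem.Chars.join ['\n'] ([] :: x :: L) = '\n' :: PySem.Chars.join ['\n'] (x :: L) := by
  rw [PySem.Chars.join_cons_cons]; simp

-- a marker without '\n' is a prefix of the whole string iff it is a prefix of the first line
theorem pvPrefix_newline (M : List Char) (hM : '\n' ∉ M) (h r : List Char) :
    List.isPrefixOf M (h ++ '\n' :: r) = List.isPrefixOf M h := by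
  induction M generalizing h with
  | nil => simp [List.isPrefixOf]
  | cons m M' ih =>
    cases h with
    | nil =>
      simp only [List.nil_append, List.isPrefixOf]
      have : (m == '\n') = false := by
        simp only [beq_eq_false_iff_ne, ne_eq]
        intro e; exact hM (e ▸ List.mem_cons_self)
      simp [this]
    | cons x h' =>
      simp only [List.cons_append, List.isPrefixOf]
      rw [ih (fun hm => hM (List.mem_cons_of_mem _ hm)) h']

theorem pvStartswith_join (M : List Char) (hM : '\n' ∉ M) (h : List Char)
    (t : List (List Char)) :
    PySem.Chars.startswith (PySem.Chars.join ['\n'] (h :: t)) M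
      = PySem.Chars.startswith h M := by
  cases t with
  | nil => rw [PySem.Chars.join_singleton]
  | cons q t' =>
    rw [PySem.Chars.join_cons_cons]
    show List.isPrefixOf M (h ++ ['\n'] ++ _) = List.isPrefixOf M h
    rw [List.append_assoc]
    exact pvPrefix_newline M hM h _

theorem pvNoNl_A : '\n' ∉ "**Answer:**".toList := by decide
theorem pvNoNl_E : '\n' ∉ "**Evidence:**".toList := by decide

-- A's check on the first line equals B's check on the whole remaining string
theorem pvCheck_eq (cs h : List Char) (t : List (List Char))
    (hsplit : pvSplit cs = h :: t) :
    (PySem.Chars.startswith cs "**Answer:**".toList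
      || PySem.Chars.startswith cs "**Evidence:**".toList)
    = (PySem.Chars.startswith h "**Answer:**".toList
      || PySem.Chars.startswith h "**Evidence:**".toList) := by
  have hc : cs = PySem.Chars.join ['\n'] (h :: t) := by
    rw [← hsplit, pvJoin_pvSplit]
  rw [hc, pvStartswith_join _ pvNoNl_A, pvStartswith_join _ pvNoNl_E]

theorem pvG_nil : pvG [] = [] := by decide

-- the main invariant: B's single pass computes A's per-line map-and-join
theorem pvMain (cs : List Char) :
    pvAltGo cs true = PySem.Chars.join ['\n'] ((pvSplit cs).map pvG)
    ∧ ∀ h t, pvSplit cs = h :: t →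
        pvAltGo cs false = PySem.Chars.join ['\n'] (h :: t.map pvG) := by
  induction cs with
  | nil =>
    constructor
    · simp [pvAltGo, pvSplit, pvG_nil, PySem.Chars.join_singleton]
    · intro h t e
      simp only [pvSplit] at e
      cases e
      simp [pvAltGo, PySem.Chars.join_singleton]
  | cons c rest ih =>
    obtain ⟨ihP, ihQ⟩ := ih
    rcases e : pvSplit rest with _ | ⟨h0, t0⟩
    · exact absurd e (pvSplit_ne_nil rest)
    by_cases hc : c = '\n'
    · subst hc
      have hA : PySem.Chars.startswith ('\n' :: rest) "**Answer:**".toList = false := by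
        simp [PySem.Chars.startswith, List.isPrefixOf]
      have hE : PySem.Chars.startswith ('\n' :: rest) "**Evidence:**".toList = false := by
        simp [PySem.Chars.startswith, List.isPrefixOf]
      have hsplit : pvSplit ('\n' :: rest) = [] :: h0 :: t0 := by
        simp [pvSplit, e]
      constructor
      · simp only [pvAltGo, hA, hE, Bool.or_self, Bool.and_false, Bool.false_eq_true,
          if_false, hsplit]
        rw [List.map_cons, pvG_nil, List.map_cons, pvJoin_nil_cons, ← List.map_cons, ← e, ← ihP]
        simp
      · intro h t he
        rw [hsplit] at he
        cases he
        simp only [pvAltGo, Bool.false_and, Bool.false_eq_true, if_false]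
        rw [List.map_cons, pvJoin_nil_cons, ← List.map_cons, ← e, ← ihP]
        simp
    · have hsplit : pvSplit (c :: rest) = (c :: h0) :: t0 := by
        simp [pvSplit, hc, e]
      have hck := pvCheck_eq (c :: rest) (c :: h0) t0 hsplit
      have hstart : (c == '\n') = false := by
        simp only [beq_eq_false_iff_ne]; exact hc
      constructor
      · simp only [pvAltGo, Bool.true_and, hstart, hsplit, List.map_cons]
        by_cases hchk : (PySem.Chars.startswith (c :: h0) "**Answer:**".toList
            || PySem.Chars.startswith (c :: h0) "**Evidence:**".toList) = true
        · rw [hck, hchk]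
          simp only [if_true]
          have hg : pvG (c :: h0) = '\n' :: c :: h0 := by
            unfold pvG
            rcases Bool.or_eq_true _ _ |>.mp hchk with h1 | h1
            · rw [h1]; simp
            · split_ifs with h2
              · rfl
              · rfl
          rw [hg, pvJoin_cons_head, pvJoin_cons_head, ihQ h0 t0 e]
        · rw [hck]
          simp only [hchk, Bool.false_eq_true, if_false]
          have hchk' := hchk
          rw [Bool.or_eq_true] at hchk'
          rw [not_or] at hchk'
          have hg : pvG (c :: h0) = c :: h0 := by
            unfold pvG
            rw [Bool.eq_false_iff.mpr hchk'.1, Bool.eq_false_iff.mpr hchk'.2]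
            simp
          rw [hg, pvJoin_cons_head, ihQ h0 t0 e]
      · intro h t he
        rw [hsplit] at he
        cases he
        simp only [pvAltGo, Bool.false_and, Bool.false_eq_true, if_false, hstart]
        rw [pvJoin_cons_head, ihQ h0 t0 e]

-- A's foldl body is 'append the singleton [pvG line]'
theorem pvFoldl_eq_map (lines : List (List Char)) :
    lines.foldl (fun acc line =>
      if PySem.Chars.startswith line "**Answer:**".toList then acc ++ ['\n' :: line]
      else if PySem.Chars.startswith line "**Evidence:**".toList then acc ++ ['\n' :: line]
      else acc ++ [line]) []
    = lines.map pvG := by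
  have hstep : (fun (acc : List (List Char)) line =>
      if PySem.Chars.startswith line "**Answer:**".toList then acc ++ ['\n' :: line]
      else if PySem.Chars.startswith line "**Evidence:**".toList then acc ++ ['\n' :: line]
      else acc ++ [line])
      = fun acc line => acc ++ [pvG line] := by
    funext acc line
    unfold pvG
    split_ifs <;> rfl
  rw [hstep, PySem.List.foldl_append_singleton_eq_map]
  simp

-- ===== VERDICT (by name: the statement is the Claim_ definition above) =====
theorem format_answer_for_display_spec : Claim_equal_format_answer_for_display := by
  intro answer _
  unfold Spec_format_answer_for_display format_answer_for_display format_answer_for_display_alt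
  simp only [pvSplitOn_eq, pvFoldl_eq_map]
  rw [(pvMain answer.toList).1]
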